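-- pv_equiv track=rewrite | github.com/tintayadev/Programming-exercises | jvPY/1007.py | obtener_cantidad_prefijo
-- ===== SOURCE A (Python) =====
-- def obtener_cantidad_prefijo(frase):
--     letras = set()
--     tam_prefijo = 0
--     for palabra in frase:
--         letra = palabra[0]
--         if letra in letras:
--             continue
--         letras.add(letra)
--         cantidad = sum(1 for p in frase if p[0] == letra)
--         if cantidad > tam_prefijo:
--             tam_prefijo = cantidad
--     return tam_prefijo
-- ===== SOURCE B (Python) =====
-- def obtener_cantidad_prefijo(frase):
--     claves = sorted(p[0] for p in frase)
--     mejor = 0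
--     while claves:
--         letra = claves[0]
--         j = 1
--         while j < len(claves) and claves[j] == letra:
--             j += 1
--         if j > mejor:
--             mejor = j
--         claves = claves[j:]
--     return mejor
-- ===== Notes on version B (the rewrite author's own statement) =====
-- stated objective: alternative
-- what changed: Replaces A's per-distinct-letter full-list rescans (set of seen letters + inner sum over the whole list) with one sort of the first letters followed by a single pass that measures consecutive runs of equal letters and keeps the longest.
import Mathlib
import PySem

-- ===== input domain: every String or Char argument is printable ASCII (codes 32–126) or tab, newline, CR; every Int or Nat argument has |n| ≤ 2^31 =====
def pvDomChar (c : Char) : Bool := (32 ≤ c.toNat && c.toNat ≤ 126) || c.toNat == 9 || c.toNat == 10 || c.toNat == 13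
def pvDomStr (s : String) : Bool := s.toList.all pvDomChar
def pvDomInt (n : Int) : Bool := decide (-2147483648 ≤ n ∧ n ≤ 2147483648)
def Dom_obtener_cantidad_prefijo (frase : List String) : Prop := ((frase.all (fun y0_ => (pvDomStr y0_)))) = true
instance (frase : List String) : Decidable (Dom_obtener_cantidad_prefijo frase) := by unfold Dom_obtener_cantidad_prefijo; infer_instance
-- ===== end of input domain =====

-- B replaces A's repeated full-list rescans per distinct first letter by sorting the
-- first letters once and scanning runs of equal letters in one pass (objective: alternative).

-- ===== PORT A =====
-- palabra[0]: exact for nonempty palabra (Pre_ excludes empty words, where Python raises IndexError)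
def pvFirstA (p : String) : Char := (PySem.Str.pyGet? p 0).getD ' '

def pvALoop (frase : List String) : List String → PySem.Set Char → Int → Int
  | [], _, tam_prefijo => tam_prefijo
  | palabra :: rest, letras, tam_prefijo =>
    let letra := pvFirstA palabra
    if PySem.Set.contains letras letra then
      pvALoop frase rest letras tam_prefijo
    else
      let cantidad : Int := ((frase.filter (fun p => pvFirstA p == letra)).length : Int)
      pvALoop frase rest (PySem.Set.add letras letra)
        (if cantidad > tam_prefijo then cantidad else tam_prefijo)

def obtener_cantidad_prefijo (frase : List String) : Int :=
  pvALoop frase frase PySem.Set.empty 0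

-- ===== PORT B =====
-- the outer while loop over 'claves': measure the run of the head letter, drop it, recurse
def pvBLoop : List Char → Int → Int
  | [], mejor => mejor
  | letra :: rest, mejor =>
    let j : Int := 1 + ((rest.takeWhile (fun c => c == letra)).length : Int)
    pvBLoop (rest.dropWhile (fun c => c == letra)) (if j > mejor then j else mejor)
termination_by claves _ => claves.length
decreasing_by
  simpa using Nat.lt_succ_of_le (List.length_dropWhile_le _ _)

def obtener_cantidad_prefijo_alt (frase : List String) : Int :=
  pvBLoop (PySem.List.sorted (frase.map pvFirstA) (fun c => c) false) 0

-- ===== PRECONDITION & SPEC =====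
-- Pre_ excludes lists containing an empty word: there Python A raises IndexError on palabra[0]
-- (and Python B raises the same IndexError in its sort key).
def Pre_obtener_cantidad_prefijo (frase : List String) : Prop := ∀ s ∈ frase, s ≠ ""
instance (frase : List String) : Decidable (Pre_obtener_cantidad_prefijo frase) := by unfold Pre_obtener_cantidad_prefijo; infer_instance
def pvWitness_obtener_cantidad_prefijo : List String := ["ab", "ac", "ba", "c"]

def Spec_obtener_cantidad_prefijo (frase : List String) (out : Int) : Prop := out = obtener_cantidad_prefijo_alt frase
instance (frase : List String) (out : Int) : Decidable (Spec_obtener_cantidad_prefijo frase out) := by unfold Spec_obtener_cantidad_prefijo; infer_instance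

-- ===== CLAIM (what is proved, stated in full; the proofs are below) =====
def Claim_equal_obtener_cantidad_prefijo : Prop := ∀ (frase : List String), Dom_obtener_cantidad_prefijo frase → Pre_obtener_cantidad_prefijo frase → Spec_obtener_cantidad_prefijo frase (obtener_cantidad_prefijo frase)

-- ===== LEMMAS AND PROOFS =====

-- count of words of 'frase' whose first letter is c
def pvCnt (frase : List String) (c : Char) : Nat :=
  (frase.filter (fun p => pvFirstA p == c)).length

theorem pvCnt_eq_count (frase : List String) (c : Char) :
    pvCnt frase c = (frase.map pvFirstA).count c := by
  simp [pvCnt, List.count_eq_countP, ← List.countP_eq_length_filter, List.countP_map,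
    Function.comp_def]

-- characterization of A's loop
theorem pvALoop_spec (frase : List String) :
    ∀ (suffix : List String) (letras : PySem.Set Char) (tam : Int),
      0 ≤ tam →
      (∀ c ∈ (letras : List Char), (pvCnt frase c : Int) ≤ tam) →
      tam ≤ pvALoop frase suffix letras tam ∧
      (∀ p ∈ suffix, (pvCnt frase (pvFirstA p) : Int) ≤ pvALoop frase suffix letras tam) ∧
      (pvALoop frase suffix letras tam = tam ∨
        ∃ p ∈ suffix, pvALoop frase suffix letras tam = (pvCnt frase (pvFirstA p) : Int)) := by
  intro suffix
  induction suffix with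
  | nil => intro letras tam h0 hinv; simp [pvALoop]
  | cons palabra rest ih =>
    intro letras tam h0 hinv
    by_cases hmem : PySem.Set.contains letras (pvFirstA palabra) = true
    · have hc : (pvCnt frase (pvFirstA palabra) : Int) ≤ tam :=
        hinv _ (List.mem_of_elem_eq_true hmem)
      obtain ⟨h1, h2, h3⟩ := ih letras tam h0 hinv
      have heq : pvALoop frase (palabra :: rest) letras tam = pvALoop frase rest letras tam := by
        simp only [pvALoop, hmem, if_true]
      refine ⟨?_, ?_, ?_⟩ <;> rw [heq]
      · exact h1
      · intro p hp
        rcases List.mem_cons.mp hp with hp | hp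
        · exact le_trans (by simpa [hp] using hc) h1
        · exact h2 p hp
      · rcases h3 with h3 | ⟨p, hp, hval⟩
        · exact Or.inl h3
        · exact Or.inr ⟨p, List.mem_cons_of_mem _ hp, hval⟩
    · have hnm : pvFirstA palabra ∉ (letras : List Char) := fun h =>
        hmem (List.elem_eq_true_of_mem h)
      obtain ⟨h1, h2, h3⟩ := ih (PySem.Set.add letras (pvFirstA palabra))
        (if (pvCnt frase (pvFirstA palabra) : Int) > tam then (pvCnt frase (pvFirstA palabra) : Int) else tam)
        (by split <;> omega)
        (by
          intro c hcmem
          rcases (PySem.Set.mem_add _ _ _).mp hcmem with h | h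
          · exact le_trans (hinv c h) (by split <;> omega)
          · rw [h]; split <;> omega)
      have heq : pvALoop frase (palabra :: rest) letras tam =
          pvALoop frase rest (PySem.Set.add letras (pvFirstA palabra))
            (if (pvCnt frase (pvFirstA palabra) : Int) > tam then (pvCnt frase (pvFirstA palabra) : Int) else tam) := by
        simp only [pvALoop, hmem, Bool.false_eq_true, if_false]
        rfl
      refine ⟨?_, ?_, ?_⟩ <;> rw [heq]
      · exact le_trans (le_trans (by split <;> omega) h1) (le_refl _)
      · intro p hp
        rcases List.mem_cons.mp hp with hp | hp
        · refine le_trans ?_ h1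
          rw [hp]; split <;> omega
        · exact h2 p hp
      · rcases h3 with h3 | ⟨p, hp, hval⟩
        · rw [h3]
          split
          · exact Or.inr ⟨palabra, List.mem_cons_self, rfl⟩
          · exact Or.inl rfl
        · exact Or.inr ⟨p, List.mem_cons_of_mem _ hp, hval⟩

-- characterization of B's loop on a sorted (Pairwise ≤) list
theorem pvBLoop_spec :
    ∀ (s : List Char) (mejor : Int),
      s.Pairwise (· ≤ ·) → 0 ≤ mejor →
      mejor ≤ pvBLoop s mejor ∧
      (∀ c ∈ s, (s.count c : Int) ≤ pvBLoop s mejor) ∧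
      (pvBLoop s mejor = mejor ∨ ∃ c ∈ s, pvBLoop s mejor = (s.count c : Int)) := by
  intro s mejor
  induction s, mejor using pvBLoop.induct with
  | case1 mejor => intro _ _; simp [pvBLoop]
  | case2 letra rest mejor j ih =>
    intro hpw h0
    simp only [dite_eq_ite] at ih
    have hrw : rest.takeWhile (fun c => c == letra) ++ rest.dropWhile (fun c => c == letra) = rest :=
      List.takeWhile_append_dropWhile
    have hg : ∀ c ∈ rest.takeWhile (fun c => c == letra), c = letra := by
      intro c hc
      simpa using List.mem_takeWhile_imp hc
    have hle : ∀ c ∈ rest, letra ≤ c := fun c hc => (List.pairwise_cons.mp hpw).1 c hc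
    have hpwrest : rest.Pairwise (· ≤ ·) := (List.pairwise_cons.mp hpw).2
    have hpwd : (rest.dropWhile (fun c => c == letra)).Pairwise (· ≤ ·) :=
      hpwrest.sublist (List.dropWhile_sublist _)
    have hd : ∀ c ∈ rest.dropWhile (fun c => c == letra), c ≠ letra := by
      cases hdw : rest.dropWhile (fun c => c == letra) with
      | nil => simp
      | cons h t =>
        have hh : ¬ (h == letra) = true := by
          have := List.head_dropWhile_not (p := fun c => c == letra) (l := rest) (by rw [hdw]; simp)
          simpa [hdw] using this
        have hh' : h ≠ letra := by simpa using hh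
        have hhmem : h ∈ rest := (List.dropWhile_sublist _).subset (by rw [hdw]; exact List.mem_cons_self)
        have hlt : letra < h := lt_of_le_of_ne (hle h hhmem) (Ne.symm hh')
        intro c hc
        rcases List.mem_cons.mp hc with rfl | hct
        · exact hh'
        · have hpwd' := hpwd
          rw [hdw] at hpwd'
          have hhc : h ≤ c := (List.pairwise_cons.mp hpwd').1 c hct
          exact ne_of_gt (lt_of_lt_of_le hlt hhc)
    -- counts
    have hcount_letra : (letra :: rest).count letra = 1 + (rest.takeWhile (fun c => c == letra)).length := by
      have h1 : (rest.dropWhile (fun c => c == letra)).count letra = 0 := by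
        rw [List.count_eq_zero]
        intro hmem
        exact hd letra hmem rfl
      have h2 : (rest.takeWhile (fun c => c == letra)).count letra =
          (rest.takeWhile (fun c => c == letra)).length :=
        List.count_eq_length.mpr (fun c hc => by simpa using (hg c hc).symm)
      calc (letra :: rest).count letra = rest.count letra + 1 := List.count_cons_self ..
        _ = ((rest.takeWhile (fun c => c == letra)).count letra +
              (rest.dropWhile (fun c => c == letra)).count letra) + 1 := by
              rw [← List.count_append, hrw]
        _ = 1 + (rest.takeWhile (fun c => c == letra)).length := by rw [h1, h2]; omega
    have hcount_other : ∀ c, c ≠ letra →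
        (letra :: rest).count c = (rest.dropWhile (fun c => c == letra)).count c := by
      intro c hc
      have h2 : (rest.takeWhile (fun c => c == letra)).count c = 0 := by
        rw [List.count_eq_zero]
        intro hmem
        exact hc (hg c hmem)
      rw [show ((letra :: rest).count c) = rest.count c by simp [Ne.symm hc]]
      conv_lhs => rw [← hrw]
      rw [List.count_append, h2, Nat.zero_add]
    -- unfold one step of the loop
    have heq : pvBLoop (letra :: rest) mejor =
        pvBLoop (rest.dropWhile (fun c => c == letra))
          (if (1 + ((rest.takeWhile (fun c => c == letra)).length : Int)) > mejor
            then 1 + ((rest.takeWhile (fun c => c == letra)).length : Int) else mejor) := by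
      simp only [pvBLoop]
    have h0' : 0 ≤ (if (1 + ((rest.takeWhile (fun c => c == letra)).length : Int)) > mejor
            then 1 + ((rest.takeWhile (fun c => c == letra)).length : Int) else mejor) := by
      split <;> omega
    obtain ⟨h1, h2, h3⟩ := ih hpwd h0'
    have hmle : mejor ≤ (if (1 + ((rest.takeWhile (fun c => c == letra)).length : Int)) > mejor
            then 1 + ((rest.takeWhile (fun c => c == letra)).length : Int) else mejor) := by
      split <;> omega
    have hjle : (1 + ((rest.takeWhile (fun c => c == letra)).length : Int)) ≤
        (if (1 + ((rest.takeWhile (fun c => c == letra)).length : Int)) > mejor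
            then 1 + ((rest.takeWhile (fun c => c == letra)).length : Int) else mejor) := by
      split <;> omega
    refine ⟨?_, ?_, ?_⟩ <;> rw [heq]
    · exact le_trans hmle h1
    · intro c hc
      by_cases hcl : c = letra
      · subst hcl
        rw [hcount_letra]
        refine le_trans ?_ (le_trans hjle h1)
        push_cast; omega
      · have hcd : c ∈ rest.dropWhile (fun c => c == letra) := by
          rcases List.mem_cons.mp hc with rfl | hcr
          · exact absurd rfl hcl
          · rcases List.mem_append.mp (by rw [hrw]; exact hcr) with h | h
            · exact absurd (hg c h) hcl
            · exact h
        rw [hcount_other c hcl]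
        exact h2 c hcd
    · rcases h3 with h3 | ⟨c, hc, hval⟩
      · rw [h3]
        split
        · refine Or.inr ⟨letra, List.mem_cons_self, ?_⟩
          rw [hcount_letra]; push_cast; ring
        · exact Or.inl rfl
      · refine Or.inr ⟨c, ?_, ?_⟩
        · exact List.mem_cons_of_mem _ ((List.dropWhile_sublist _).subset hc)
        · rw [hval, hcount_other c (hd c hc)]

-- ===== VERDICT (by name: the statement is the Claim_ definition above) =====
theorem obtener_cantidad_prefijo_spec : Claim_equal_obtener_cantidad_prefijo := by
  intro frase _ _
  unfold Spec_obtener_cantidad_prefijo obtener_cantidad_prefijo obtener_cantidad_prefijo_alt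
  obtain ⟨hA1, hA2, hA3⟩ := pvALoop_spec frase frase PySem.Set.empty 0 le_rfl
    (by intro c hc; simp [PySem.Set.empty] at hc)
  obtain ⟨hB1, hB2, hB3⟩ := pvBLoop_spec
    (PySem.List.sorted (frase.map pvFirstA) (fun c => c) false) 0
    (PySem.List.sorted_pairwise _ _) le_rfl
  have hperm : (PySem.List.sorted (frase.map pvFirstA) (fun c => c) false).Perm (frase.map pvFirstA) :=
    PySem.List.sorted_perm _ _ _
  have hcount : ∀ c, (PySem.List.sorted (frase.map pvFirstA) (fun c => c) false).count c =
      pvCnt frase c := by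
    intro c
    rw [hperm.count_eq, pvCnt_eq_count]
  -- A ≤ B
  have hAB : pvALoop frase frase PySem.Set.empty 0 ≤
      pvBLoop (PySem.List.sorted (frase.map pvFirstA) (fun c => c) false) 0 := by
    rcases hA3 with h | ⟨p, hp, hval⟩
    · rw [h]; exact hB1
    · rw [hval]
      have hcmem : pvFirstA p ∈ PySem.List.sorted (frase.map pvFirstA) (fun c => c) false := by
        rw [PySem.List.mem_sorted]
        exact List.mem_map_of_mem hp
      have := hB2 _ hcmem
      rwa [hcount] at this
  -- B ≤ A
  have hBA : pvBLoop (PySem.List.sorted (frase.map pvFirstA) (fun c => c) false) 0 ≤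
      pvALoop frase frase PySem.Set.empty 0 := by
    rcases hB3 with h | ⟨c, hc, hval⟩
    · rw [h]; exact hA1
    · rw [hval, hcount]
      have hcm : c ∈ frase.map pvFirstA := (PySem.List.mem_sorted _ _ _ _).mp hc
      obtain ⟨p, hp, rfl⟩ := List.mem_map.mp hcm
      exact hA2 p hp
  omega
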